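-- pv_equiv track=rewrite | github.com/swamy-lab-sys/drishi_pro | user_manager.py | get_role_style_hint
-- ===== SOURCE A (Python) =====
-- def get_role_style_hint(role: str) -> str:
--     """
--     Return an answer-style instruction string based on the candidate's role.
--     Used to guide the LLM focus when injected into the system prompt.
--     """
--     if not role:
--         return ''
--     r = role.lower()
--
--     if any(k in r for k in ('production support', 'prod support', 'support engineer', 'l2', 'l3',
--                              'l1 support', 'l2 support', 'l3 support', 'system administrator',
--                              'sysadmin', 'linux admin', 'unix admin', 'infrastructure support')):
--         return (
--             'Answer style: Focus on Linux/Unix commands, log analysis (grep/awk/sed), '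
--             'monitoring tools (top/htop/vmstat/netstat), systemd/journalctl, '
--             'incident response steps, and automation scripts. '
--             'Prefer command-line answers over code. Show actual commands in backticks.'
--         )
--     if any(k in r for k in ('openstack', 'cloud infrastructure', 'cloud operations', 'cloud support',
--                              'cloud admin', 'openstack admin', 'openstack support')):
--         return (
--             'Answer style: Focus on OpenStack services (Nova/Neutron/Cinder/Glance/Keystone), '
--             'VM lifecycle management, live migration, KVM/QEMU, OVS networking, '
--             'Ceph storage, and production OpenStack troubleshooting workflows.'
--         )
--     if any(k in r for k in ('devops', 'platform engineer', 'infra engineer', 'release engineer')):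
--         return (
--             'Answer style: Emphasize CI/CD pipelines, Docker, Kubernetes, '
--             'infrastructure-as-code (Ansible/Terraform), and observability stack. '
--             'Show Jenkinsfile/YAML snippets where relevant.'
--         )
--     if any(k in r for k in ('sre', 'site reliability', 'reliability engineer')):
--         return (
--             'Answer style: Focus on SLO/SLI/error budgets, the four golden signals, '
--             'on-call incident response, Prometheus/Grafana, and toil reduction. '
--             'Quantify availability and latency targets where possible.'
--         )
--     if any(k in r for k in ('java developer', 'java engineer', 'j2ee', 'spring developer')):
--         return (
--             'Answer style: Focus on JVM internals, garbage collection, Spring Boot, '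
--             'Java concurrency (ThreadPool, CompletableFuture), design patterns, '
--             'and JPA/Hibernate. Prefer Java code examples.'
--         )
--     if any(k in r for k in ('python developer', 'python engineer', 'backend developer', 'backend engineer',
--                              'software engineer', 'backend', 'full stack', 'full-stack')):
--         return (
--             'Answer style: Focus on Python internals (GIL, generators, decorators, asyncio, closures), '
--             'Django ORM/QuerySet patterns, Django REST Framework (DRF ViewSets, serializers, JWT auth), '
--             'Celery task queues, Redis caching, and API best practices. '
--             'Include short inline code examples for concept questions.'
--         )
--     if any(k in r for k in ('autosys', 'batch', 'etl', 'job scheduling', 'workload automation',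
--                              'batch support', 'etl engineer', 'batch engineer')):
--         return (
--             'Answer style: Focus on Autosys JIL, job states, sendevent commands, '
--             'box job dependencies, and production batch failure recovery procedures. '
--             'Show actual Autosys commands in backticks.'
--         )
--     if any(k in r for k in ('data engineer', 'data scientist', 'ml engineer', 'analytics', 'bi engineer')):
--         return (
--             'Answer style: Emphasize data pipelines, SQL optimization, ETL workflows, '
--             'Python data libraries (Pandas/PySpark), and large-scale data processing.'
--         )
--     if any(k in r for k in ('cloud engineer', 'cloud architect', 'cloud', 'aws', 'azure', 'gcp')):
--         return (
--             'Answer style: Focus on cloud services (compute/storage/networking/IAM), '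
--             'managed infrastructure, cost optimization, and cloud-native architectures.'
--         )
--     return ''
-- ===== SOURCE B (Python) =====
-- _HINTS = [
--     'Answer style: Focus on Linux/Unix commands, log analysis (grep/awk/sed), '
--     'monitoring tools (top/htop/vmstat/netstat), systemd/journalctl, '
--     'incident response steps, and automation scripts. '
--     'Prefer command-line answers over code. Show actual commands in backticks.',
--     'Answer style: Focus on OpenStack services (Nova/Neutron/Cinder/Glance/Keystone), '
--     'VM lifecycle management, live migration, KVM/QEMU, OVS networking, '
--     'Ceph storage, and production OpenStack troubleshooting workflows.',
--     'Answer style: Emphasize CI/CD pipelines, Docker, Kubernetes, '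
--     'infrastructure-as-code (Ansible/Terraform), and observability stack. '
--     'Show Jenkinsfile/YAML snippets where relevant.',
--     'Answer style: Focus on SLO/SLI/error budgets, the four golden signals, '
--     'on-call incident response, Prometheus/Grafana, and toil reduction. '
--     'Quantify availability and latency targets where possible.',
--     'Answer style: Focus on JVM internals, garbage collection, Spring Boot, '
--     'Java concurrency (ThreadPool, CompletableFuture), design patterns, '
--     'and JPA/Hibernate. Prefer Java code examples.',
--     'Answer style: Focus on Python internals (GIL, generators, decorators, asyncio, closures), '
--     'Django ORM/QuerySet patterns, Django REST Framework (DRF ViewSets, serializers, JWT auth), '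
--     'Celery task queues, Redis caching, and API best practices. '
--     'Include short inline code examples for concept questions.',
--     'Answer style: Focus on Autosys JIL, job states, sendevent commands, '
--     'box job dependencies, and production batch failure recovery procedures. '
--     'Show actual Autosys commands in backticks.',
--     'Answer style: Emphasize data pipelines, SQL optimization, ETL workflows, '
--     'Python data libraries (Pandas/PySpark), and large-scale data processing.',
--     'Answer style: Focus on cloud services (compute/storage/networking/IAM), '
--     'managed infrastructure, cost optimization, and cloud-native architectures.',
-- ]
--
-- _KEYWORD_GROUPS = [
--     ('production support', 'prod support', 'support engineer', 'l2', 'l3',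
--      'l1 support', 'l2 support', 'l3 support', 'system administrator',
--      'sysadmin', 'linux admin', 'unix admin', 'infrastructure support'),
--     ('openstack', 'cloud infrastructure', 'cloud operations', 'cloud support',
--      'cloud admin', 'openstack admin', 'openstack support'),
--     ('devops', 'platform engineer', 'infra engineer', 'release engineer'),
--     ('sre', 'site reliability', 'reliability engineer'),
--     ('java developer', 'java engineer', 'j2ee', 'spring developer'),
--     ('python developer', 'python engineer', 'backend developer', 'backend engineer',
--      'software engineer', 'backend', 'full stack', 'full-stack'),
--     ('autosys', 'batch', 'etl', 'job scheduling', 'workload automation',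
--      'batch support', 'etl engineer', 'batch engineer'),
--     ('data engineer', 'data scientist', 'ml engineer', 'analytics', 'bi engineer'),
--     ('cloud engineer', 'cloud architect', 'cloud', 'aws', 'azure', 'gcp'),
-- ]
--
-- # Flat priority index: every keyword paired with the priority of its group.
-- _KEYWORD_PRIORITY = [(kw, i) for i, kws in enumerate(_KEYWORD_GROUPS) for kw in kws]
--
--
-- def get_role_style_hint(role: str) -> str:
--     """
--     Return an answer-style instruction string based on the candidate's role.
--     Aggregate version: collect the priorities of ALL keywords occurring in the
--     role and answer with the hint of the highest-priority (smallest-index) one;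
--     this equals the first-match cascade because priorities are group-constant
--     and ascending.
--     """
--     if not role:
--         return ''
--     r = role.lower()
--     hits = [i for kw, i in _KEYWORD_PRIORITY if kw in r]
--     if not hits:
--         return ''
--     return _HINTS[min(hits)]
-- ===== Notes on version B (the rewrite author's own statement) =====
-- stated objective: alternative
-- what changed: Instead of a nine-branch first-match cascade, B flattens all keywords into one priority-indexed list, collects the priorities of every keyword found in the role in a single comprehension, and returns the hint of the minimum priority (aggregate min-reduction instead of short-circuiting branch dispatch).
import Mathlib
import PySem

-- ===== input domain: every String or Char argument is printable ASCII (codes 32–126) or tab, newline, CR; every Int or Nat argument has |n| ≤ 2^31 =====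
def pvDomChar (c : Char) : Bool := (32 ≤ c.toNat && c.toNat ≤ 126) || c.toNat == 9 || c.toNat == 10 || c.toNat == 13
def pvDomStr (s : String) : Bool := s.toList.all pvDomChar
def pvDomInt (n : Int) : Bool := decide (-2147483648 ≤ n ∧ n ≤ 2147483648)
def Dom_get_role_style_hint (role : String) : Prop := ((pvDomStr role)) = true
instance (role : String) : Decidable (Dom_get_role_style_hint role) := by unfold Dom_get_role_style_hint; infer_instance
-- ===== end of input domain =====

-- B replaces A's first-match if-cascade by an aggregate computation: collect the priorities of ALL keywords found
-- in the role from one flat priority-indexed keyword list and return the hint of the minimum priority (alternative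
-- decomposition; same behaviour).

-- ===== PORT A =====
def get_role_style_hint (role : String) : String :=
  if role == "" then ""
  else
  let r := PySem.Str.lower role
  if ["production support", "prod support", "support engineer", "l2", "l3", "l1 support", "l2 support", "l3 support", "system administrator", "sysadmin", "linux admin", "unix admin", "infrastructure support"].any (fun k => PySem.Str.isIn k r) then
    "Answer style: Focus on Linux/Unix commands, log analysis (grep/awk/sed), monitoring tools (top/htop/vmstat/netstat), systemd/journalctl, incident response steps, and automation scripts. Prefer command-line answers over code. Show actual commands in backticks."
  else
  if ["openstack", "cloud infrastructure", "cloud operations", "cloud support", "cloud admin", "openstack admin", "openstack support"].any (fun k => PySem.Str.isIn k r) then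
    "Answer style: Focus on OpenStack services (Nova/Neutron/Cinder/Glance/Keystone), VM lifecycle management, live migration, KVM/QEMU, OVS networking, Ceph storage, and production OpenStack troubleshooting workflows."
  else
  if ["devops", "platform engineer", "infra engineer", "release engineer"].any (fun k => PySem.Str.isIn k r) then
    "Answer style: Emphasize CI/CD pipelines, Docker, Kubernetes, infrastructure-as-code (Ansible/Terraform), and observability stack. Show Jenkinsfile/YAML snippets where relevant."
  else
  if ["sre", "site reliability", "reliability engineer"].any (fun k => PySem.Str.isIn k r) then
    "Answer style: Focus on SLO/SLI/error budgets, the four golden signals, on-call incident response, Prometheus/Grafana, and toil reduction. Quantify availability and latency targets where possible."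
  else
  if ["java developer", "java engineer", "j2ee", "spring developer"].any (fun k => PySem.Str.isIn k r) then
    "Answer style: Focus on JVM internals, garbage collection, Spring Boot, Java concurrency (ThreadPool, CompletableFuture), design patterns, and JPA/Hibernate. Prefer Java code examples."
  else
  if ["python developer", "python engineer", "backend developer", "backend engineer", "software engineer", "backend", "full stack", "full-stack"].any (fun k => PySem.Str.isIn k r) then
    "Answer style: Focus on Python internals (GIL, generators, decorators, asyncio, closures), Django ORM/QuerySet patterns, Django REST Framework (DRF ViewSets, serializers, JWT auth), Celery task queues, Redis caching, and API best practices. Include short inline code examples for concept questions."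
  else
  if ["autosys", "batch", "etl", "job scheduling", "workload automation", "batch support", "etl engineer", "batch engineer"].any (fun k => PySem.Str.isIn k r) then
    "Answer style: Focus on Autosys JIL, job states, sendevent commands, box job dependencies, and production batch failure recovery procedures. Show actual Autosys commands in backticks."
  else
  if ["data engineer", "data scientist", "ml engineer", "analytics", "bi engineer"].any (fun k => PySem.Str.isIn k r) then
    "Answer style: Emphasize data pipelines, SQL optimization, ETL workflows, Python data libraries (Pandas/PySpark), and large-scale data processing."
  else
  if ["cloud engineer", "cloud architect", "cloud", "aws", "azure", "gcp"].any (fun k => PySem.Str.isIn k r) then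
    "Answer style: Focus on cloud services (compute/storage/networking/IAM), managed infrastructure, cost optimization, and cloud-native architectures."
  else
  ""

-- ===== PORT B =====
-- B: one flat keyword→priority list; collect the priorities of all keywords occurring in the role and take the min.
def hintsB : List String := [
  "Answer style: Focus on Linux/Unix commands, log analysis (grep/awk/sed), monitoring tools (top/htop/vmstat/netstat), systemd/journalctl, incident response steps, and automation scripts. Prefer command-line answers over code. Show actual commands in backticks.",
  "Answer style: Focus on OpenStack services (Nova/Neutron/Cinder/Glance/Keystone), VM lifecycle management, live migration, KVM/QEMU, OVS networking, Ceph storage, and production OpenStack troubleshooting workflows.",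
  "Answer style: Emphasize CI/CD pipelines, Docker, Kubernetes, infrastructure-as-code (Ansible/Terraform), and observability stack. Show Jenkinsfile/YAML snippets where relevant.",
  "Answer style: Focus on SLO/SLI/error budgets, the four golden signals, on-call incident response, Prometheus/Grafana, and toil reduction. Quantify availability and latency targets where possible.",
  "Answer style: Focus on JVM internals, garbage collection, Spring Boot, Java concurrency (ThreadPool, CompletableFuture), design patterns, and JPA/Hibernate. Prefer Java code examples.",
  "Answer style: Focus on Python internals (GIL, generators, decorators, asyncio, closures), Django ORM/QuerySet patterns, Django REST Framework (DRF ViewSets, serializers, JWT auth), Celery task queues, Redis caching, and API best practices. Include short inline code examples for concept questions.",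
  "Answer style: Focus on Autosys JIL, job states, sendevent commands, box job dependencies, and production batch failure recovery procedures. Show actual Autosys commands in backticks.",
  "Answer style: Emphasize data pipelines, SQL optimization, ETL workflows, Python data libraries (Pandas/PySpark), and large-scale data processing.",
  "Answer style: Focus on cloud services (compute/storage/networking/IAM), managed infrastructure, cost optimization, and cloud-native architectures."]

def kwGroups : List (List String) := [
  ["production support", "prod support", "support engineer", "l2", "l3", "l1 support", "l2 support", "l3 support", "system administrator", "sysadmin", "linux admin", "unix admin", "infrastructure support"],
  ["openstack", "cloud infrastructure", "cloud operations", "cloud support", "cloud admin", "openstack admin", "openstack support"],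
  ["devops", "platform engineer", "infra engineer", "release engineer"],
  ["sre", "site reliability", "reliability engineer"],
  ["java developer", "java engineer", "j2ee", "spring developer"],
  ["python developer", "python engineer", "backend developer", "backend engineer", "software engineer", "backend", "full stack", "full-stack"],
  ["autosys", "batch", "etl", "job scheduling", "workload automation", "batch support", "etl engineer", "batch engineer"],
  ["data engineer", "data scientist", "ml engineer", "analytics", "bi engineer"],
  ["cloud engineer", "cloud architect", "cloud", "aws", "azure", "gcp"]]

-- `_KEYWORD_PRIORITY = [(kw, i) for i, kws in enumerate(_KEYWORD_GROUPS) for kw in kws]`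
def keywordPriority : List (String × Nat) :=
  kwGroups.zipIdx.flatMap (fun p => p.1.map (fun k => (k, p.2)))

-- Python's `min(hits)` on a nonempty list, as a left fold
def pyMinNat : List Nat → Option Nat
  | [] => none
  | h :: t => some (t.foldl Nat.min h)

def get_role_style_hint_alt (role : String) : String :=
  if role == "" then ""
  else
    let r := PySem.Str.lower role
    let hits := keywordPriority.filterMap (fun p => if PySem.Str.isIn p.1 r then some p.2 else none)
    match pyMinNat hits with
    | none => ""
    | some i => hintsB.getD i ""   -- index is always a valid priority (< 9); getD never uses its default

-- ===== PRECONDITION & SPEC =====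
def Spec_get_role_style_hint (role : String) (out : String) : Prop := out = get_role_style_hint_alt role
instance (role : String) (out : String) : Decidable (Spec_get_role_style_hint role out) := by unfold Spec_get_role_style_hint; infer_instance

-- ===== CLAIM (what is proved, stated in full; the proofs are below) =====
def Claim_equal_get_role_style_hint : Prop := ∀ (role : String), Dom_get_role_style_hint role → Spec_get_role_style_hint role (get_role_style_hint role)

-- ===== LEMMAS AND PROOFS =====

-- All lemmas are stated for an arbitrary keyword predicate f (instantiated with substring-membership at the end).

-- B's hit list for an arbitrary tail of the group list, starting at priority n
def hitsOf (f : String → Bool) (gs : List (List String)) (n : Nat) : List Nat :=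
  ((gs.zipIdx n).flatMap (fun p => p.1.map (fun k => (k, p.2)))).filterMap
    (fun p => if f p.1 then some p.2 else none)

-- A's cascade for an arbitrary tail of the group list: priority of the first matching group
def firstMatch (f : String → Bool) : List (List String) → Nat → Option Nat
  | [], _ => none
  | kws :: rest, n => if kws.any f then some n else firstMatch f rest (n + 1)

lemma foldl_min_absorb : ∀ (ys : List Nat) (a : Nat), (∀ y ∈ ys, a ≤ y) → ys.foldl Nat.min a = a
  | [], _, _ => rfl
  | y :: t, a, h => by
      rw [List.foldl_cons, show Nat.min a y = a from by have := h y (by simp); simp [Nat.min_def]; omega]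
      exact foldl_min_absorb t a (fun z hz => h z (by simp [hz]))

lemma foldl_min_le (y : Nat) : ∀ (t : List Nat) (h : Nat), h ≤ y → (∀ x ∈ t, x ≤ y) →
    t.foldl Nat.min h ≤ y
  | [], _, hy, _ => hy
  | x :: s, h, hy, ht =>
      foldl_min_le y s (Nat.min h x) (le_trans (Nat.min_le_left _ _) hy)
        (fun z hz => ht z (List.mem_cons_of_mem _ hz))

lemma pyMinNat_append_cons (a : Nat) (t ys : List Nat)
    (h : ∀ x ∈ a :: t, ∀ y ∈ ys, x ≤ y) :
    pyMinNat ((a :: t) ++ ys) = pyMinNat (a :: t) := by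
  simp only [pyMinNat, List.cons_append, List.foldl_append]
  rw [foldl_min_absorb ys (t.foldl Nat.min a)]
  intro y hy
  exact foldl_min_le y t a (h a (by simp) y hy) (fun x hx => h x (by simp [hx]) y hy)

lemma mem_hitsOf_le (f : String → Bool) (gs : List (List String)) (n x : Nat)
    (hx : x ∈ hitsOf f gs n) : n ≤ x := by
  induction gs generalizing n with
  | nil => simp [hitsOf] at hx
  | cons kws rest ih =>
      simp only [hitsOf, List.zipIdx_cons, List.flatMap_cons, List.filterMap_append] at hx
      rcases List.mem_append.mp hx with h1 | h2
      · rcases List.mem_filterMap.mp h1 with ⟨p, hp, hsel⟩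
        rcases List.mem_map.mp hp with ⟨k, _, rfl⟩
        simp only at hsel
        split at hsel
        · simp at hsel; omega
        · simp at hsel
      · exact le_trans (Nat.le_succ n) (ih (n + 1) h2)

lemma filterMap_map_pair (f : String → Bool) (kws : List String) (n : Nat) :
    (kws.map (fun k => (k, n))).filterMap (fun p => if f p.1 then some p.2 else none)
      = (kws.filter f).map (fun _ => n) := by
  induction kws with
  | nil => rfl
  | cons k t ih => by_cases hk : f k <;> simp [hk, ih]

lemma pyMinNat_hitsOf (f : String → Bool) (gs : List (List String)) (n : Nat) :
    pyMinNat (hitsOf f gs n) = firstMatch f gs n := by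
  induction gs generalizing n with
  | nil => rfl
  | cons kws rest ih =>
      have hdec : hitsOf f (kws :: rest) n
          = (kws.filter f).map (fun _ => n) ++ hitsOf f rest (n + 1) := by
        simp only [hitsOf, List.zipIdx_cons, List.flatMap_cons, List.filterMap_append]
        rw [filterMap_map_pair]
      rw [hdec]
      by_cases hany : kws.any f
      · obtain ⟨k, hk, hkin⟩ := List.any_eq_true.mp hany
        cases hf : (kws.filter f).map (fun _ => n) with
        | nil =>
            exfalso
            have : k ∈ kws.filter f := List.mem_filter.mpr ⟨hk, hkin⟩
            rw [List.map_eq_nil_iff.mp hf] at this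
            simp at this
        | cons a t =>
            rw [pyMinNat_append_cons]
            · have ha : a = n ∧ ∀ x ∈ t, x = n := by
                have hall : ∀ x ∈ (kws.filter f).map (fun _ => n), x = n := by
                  intro x hx
                  rcases List.mem_map.mp hx with ⟨_, _, rfl⟩
                  rfl
                rw [hf] at hall
                exact ⟨hall a (by simp), fun x hx => hall x (by simp [hx])⟩
              simp only [pyMinNat, firstMatch, hany, if_true]
              rw [ha.1, foldl_min_absorb t n (fun y hy => by rw [ha.2 y hy])]
            · intro x hx y hy
              have hx' : x = n := by
                have hall : ∀ x ∈ (kws.filter f).map (fun _ => n), x = n := by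
                  intro x hx
                  rcases List.mem_map.mp hx with ⟨_, _, rfl⟩
                  rfl
                exact hall x (by rw [hf]; exact hx)
              rw [hx']
              exact le_trans (Nat.le_succ n) (mem_hitsOf_le f rest (n + 1) y hy)
      · have hnil : kws.filter f = [] := by
          rw [List.filter_eq_nil_iff]
          intro k hk hkin
          exact hany (List.any_eq_true.mpr ⟨k, hk, hkin⟩)
        rw [hnil, List.map_nil, List.nil_append, ih]
        simp only [firstMatch, hany, Bool.false_eq_true, if_false]

-- ===== VERDICT (by name: the statement is the Claim_ definition above) =====
theorem get_role_style_hint_spec : Claim_equal_get_role_style_hint := by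
  intro role _
  unfold Spec_get_role_style_hint get_role_style_hint get_role_style_hint_alt
  by_cases h : role == ""
  · simp only [h, if_true]
  · simp only [h, Bool.false_eq_true, if_false]
    have hk : keywordPriority.filterMap
        (fun p => if PySem.Str.isIn p.1 (PySem.Str.lower role) then some p.2 else none)
        = hitsOf (fun k => PySem.Str.isIn k (PySem.Str.lower role)) kwGroups 0 := rfl
    rw [hk, pyMinNat_hitsOf]
    simp only [kwGroups, firstMatch]
    split_ifs <;> rfl
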